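-- pv_equiv track=rewrite | github.com/daniel-reich/ubiquitous-fiesta | vC4P2jGR6wxED7MBL_20.py | larger_than_right
-- ===== SOURCE A (Python) =====
-- def larger_than_right(lst):
--   res = []
--   last = False
--
--   check = sorted(lst)
--   if check[0] == check[len(check)-1]:
--     return [check[0]]
--
--   while len(lst) > 1:
--     val = max(lst)
--     res.append(val)
--
--     if lst.index(val)+1 >= len(lst):
--       last = True
--       break
--
--     lst = lst[lst.index(val)+1:]
--
--
--   if not last:
--     res.append(lst[0])
--
--
--
--   return res
-- ===== SOURCE B (Python) =====
-- def larger_than_right(lst):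
--     if min(lst) == max(lst):
--         return [lst[0]]
--     res = []
--     m = None
--     for x in reversed(lst):
--         if m is None or x >= m:
--             res.append(x)
--             m = x
--     res.reverse()
--     return res
-- ===== Notes on version B (the rewrite author's own statement) =====
-- stated objective: faster
-- what changed: Replaced the repeated max()/list.index()/slice loop (quadratic) by one right-to-left pass keeping a running maximum, collecting elements >= the max of their suffix; the all-equal special case is kept.
import Mathlib
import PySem

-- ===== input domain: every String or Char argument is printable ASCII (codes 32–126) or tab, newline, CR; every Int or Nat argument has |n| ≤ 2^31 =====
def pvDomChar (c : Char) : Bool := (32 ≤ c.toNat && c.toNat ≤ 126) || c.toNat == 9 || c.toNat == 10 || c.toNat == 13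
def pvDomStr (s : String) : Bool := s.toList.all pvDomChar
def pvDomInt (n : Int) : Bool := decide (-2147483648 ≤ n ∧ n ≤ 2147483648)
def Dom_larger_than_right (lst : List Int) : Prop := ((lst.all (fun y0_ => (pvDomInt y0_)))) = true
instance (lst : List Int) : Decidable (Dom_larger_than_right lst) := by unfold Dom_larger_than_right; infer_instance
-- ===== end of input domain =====

-- B replaces A's repeated max()/index()/slice loop (quadratic) by one right-to-left pass
-- with a running maximum (linear); A's all-equal special case is kept.

-- ===== PORT A =====
-- the while loop: val = max(lst); res.append(val); break-or-slice
def aWhileLoop (lst : List Int) (res : List Int) : List Int :=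
  if _h : lst.length > 1 then
    match PySem.List.max? lst (fun y => y) with
    | none => res          -- unreachable: lst nonempty
    | some val =>
      let res' := res ++ [val]
      match PySem.List.index? lst val with
      | none => res'       -- unreachable: val ∈ lst
      | some idx =>
        if (idx : Int) + 1 ≥ (lst.length : Int) then res'   -- last = True: break; no trailing append
        else aWhileLoop (PySem.List.slice lst (some ((idx : Int) + 1)) none) res'
  else
    -- loop exits with len(lst) ≤ 1, last is False: res.append(lst[0])
    match PySem.List.pyGet? lst 0 with
    | some v => res ++ [v]
    | none => res          -- lst[0] raises (empty list; outside Pre_)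
termination_by lst.length
decreasing_by
  rw [PySem.List.slice_from lst (show (0:Int) ≤ (idx : Int) + 1 by omega)]
  simp only [List.length_drop]
  omega

def larger_than_right (lst : List Int) : List Int :=
  let check := PySem.List.sorted lst (fun y => y) false
  match PySem.List.pyGet? check 0, PySem.List.pyGet? check ((check.length : Int) - 1) with
  | some c0, some cl =>
    if c0 == cl then [c0] else aWhileLoop lst []
  | _, _ => []             -- check[0] raises on the empty list (outside Pre_)

-- ===== PORT B =====
-- loop body: if m is None or x >= m: res.append(x); m = x
def altStep (st : List Int × Option Int) (x : Int) : List Int × Option Int :=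
  match st.2 with
  | none => (st.1 ++ [x], some x)
  | some m => if x ≥ m then (st.1 ++ [x], some x) else st

def larger_than_right_alt (lst : List Int) : List Int :=
  match PySem.List.min? lst (fun y => y) with
  | none => []             -- min(lst) raises on the empty list (outside Pre_)
  | some mn =>
    match PySem.List.max? lst (fun y => y) with
    | none => []
    | some mx =>
      if mn == mx then
        match PySem.List.pyGet? lst 0 with
        | some v => [v]
        | none => []
      else
        let st := lst.reverse.foldl altStep ([], none)
        st.1.reverse

-- ===== PRECONDITION & SPEC =====
-- A raises IndexError on the empty list (check[0] is out of range; B likewise raises there); Pre_ excludes exactly the empty list.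
def Pre_larger_than_right (lst : List Int) : Prop := lst ≠ []
instance (lst : List Int) : Decidable (Pre_larger_than_right lst) := by unfold Pre_larger_than_right; infer_instance
def pvWitness_larger_than_right : List Int := [3, 1, 2]

def Spec_larger_than_right (lst : List Int) (out : List Int) : Prop := out = larger_than_right_alt lst
instance (lst : List Int) (out : List Int) : Decidable (Spec_larger_than_right lst out) := by unfold Spec_larger_than_right; infer_instance

-- ===== CLAIM (what is proved, stated in full; the proofs are below) =====
def Claim_equal_larger_than_right : Prop := ∀ (lst : List Int), Dom_larger_than_right lst → Pre_larger_than_right lst → Spec_larger_than_right lst (larger_than_right lst)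

-- ===== LEMMAS AND PROOFS =====

-- specification function: the elements ≥ every element to their right
def lead : List Int → List Int
  | [] => []
  | x :: xs => if xs.all (fun y => y ≤ x) then x :: lead xs else lead xs

lemma lead_split (pre suf : List Int) (val : Int)
    (hpre : ∀ y ∈ pre, y < val) (hsuf : ∀ y ∈ suf, y ≤ val) :
    lead (pre ++ val :: suf) = val :: lead suf := by
  induction pre with
  | nil =>
    simp only [List.nil_append, lead]
    rw [if_pos]
    simpa using hsuf
  | cons p ps ih =>
    have hp : p < val := hpre p (by simp)
    have : ¬ ((ps ++ val :: suf).all (fun y => decide (y ≤ p)) = true) := by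
      intro hall
      have := (List.all_eq_true.mp hall) val (by simp)
      simp at this; omega
    simp only [List.cons_append, lead]
    rw [if_neg this]
    exact ih (fun y hy => hpre y (by simp [hy]))

-- running maximum maintained by B's loop, from the right
def maxO : List Int → Option Int
  | [] => none
  | x :: xs => match maxO xs with | none => some x | some m => some (max x m)

lemma maxO_eq_none_iff (l : List Int) : maxO l = none ↔ l = [] := by
  cases l with
  | nil => simp [maxO]
  | cons x xs => simp [maxO]; cases maxO xs <;> simp

lemma maxO_isMax (l : List Int) (m : Int) (h : maxO l = some m) :
    ∀ y ∈ l, y ≤ m := by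
  induction l generalizing m with
  | nil => simp [maxO] at h
  | cons x xs ih =>
    simp only [maxO] at h
    cases hm : maxO xs with
    | none =>
      rw [hm] at h
      have : x = m := by simpa using h
      have hx : xs = [] := (maxO_eq_none_iff xs).mp hm
      subst hx; simp [← this]
    | some k =>
      rw [hm] at h
      have : max x k = m := by simpa using h
      intro y hy
      rcases List.mem_cons.mp hy with rfl | hy
      · omega
      · have := ih k hm y hy; omega

lemma maxO_mem (l : List Int) (m : Int) (h : maxO l = some m) : m ∈ l := by
  induction l generalizing m with
  | nil => simp [maxO] at h
  | cons x xs ih =>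
    simp only [maxO] at h
    cases hm : maxO xs with
    | none => rw [hm] at h; simp at h; simp [h]
    | some k =>
      rw [hm] at h
      have hmax : max x k = m := by simpa using h
      rcases le_total k x with hle | hle
      · have : x = m := by omega
        simp [this]
      · have : k = m := by omega
        exact List.mem_cons_of_mem _ (this ▸ ih k hm)

-- B's fold computes (lead lst).reverse together with the running maximum
lemma foldrB (lst : List Int) :
    lst.foldr (fun x st => altStep st x) ([], none) = ((lead lst).reverse, maxO lst) := by
  induction lst with
  | nil => simp [lead, maxO]
  | cons x xs ih =>
    simp only [List.foldr_cons, ih]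
    cases hm : maxO xs with
    | none =>
      have hx : xs = [] := (maxO_eq_none_iff xs).mp hm
      subst hx
      simp [altStep, lead, maxO]
    | some m =>
      have hne : xs ≠ [] := by
        intro h; subst h; simp [maxO] at hm
      simp only [altStep]
      by_cases hge : x ≥ m
      · rw [if_pos hge]
        have hall : xs.all (fun y => decide (y ≤ x)) = true := by
          simp only [List.all_eq_true, decide_eq_true_eq]
          exact fun y hy => le_trans (maxO_isMax xs m hm y hy) hge
        simp only [lead, hall, if_true, maxO, hm, List.reverse_cons]
        simp
        omega
      · rw [if_neg hge]
        have hnall : ¬ (xs.all (fun y => decide (y ≤ x)) = true) := by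
          simp only [List.all_eq_true, decide_eq_true_eq, not_forall]
          exact ⟨m, maxO_mem xs m hm, by omega⟩
        rw [show lead (x :: xs) = lead xs by simp only [lead]; rw [if_neg (by simpa using hnall)]]
        simp only [maxO, hm]
        simp
        omega

-- A's while loop computes res ++ lead lst on any nonempty lst
lemma loopA : ∀ n (lst : List Int), lst.length = n → lst ≠ [] → ∀ res,
    aWhileLoop lst res = res ++ lead lst := by
  intro n
  induction n using Nat.strong_induction_on with
  | _ n ih =>
    intro lst hn hne res
    rw [aWhileLoop.eq_def]
    by_cases h1 : lst.length > 1
    · rw [dif_pos h1]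
      cases hm : PySem.List.max? lst (fun y => y) with
      | none => exact absurd ((PySem.List.max?_eq_none_iff lst _).mp hm) hne
      | some val =>
        have hmax : ∀ y ∈ lst, y ≤ val := by
          have := PySem.List.max?_isMax hm; simpa using this
        have hmem : val ∈ lst := PySem.List.max?_mem hm
        dsimp only
        cases hi : PySem.List.index? lst val with
        | none => exact absurd ((PySem.List.index?_eq_none_iff lst val).mp hi) (by simpa using hmem)
        | some idx =>
          dsimp only
          obtain ⟨pre, suf, hsplit, hlen, hnotin⟩ := (PySem.List.index?_eq_some_iff lst val idx).mp hi
          have hprelt : ∀ y ∈ pre, y < val := by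
            intro y hy
            have hle : y ≤ val := hmax y (by rw [hsplit]; exact List.mem_append_left _ hy)
            rcases lt_or_eq_of_le hle with h | h
            · exact h
            · exact absurd (h ▸ hy) hnotin
          have hsufle : ∀ y ∈ suf, y ≤ val := by
            intro y hy; exact hmax y (by rw [hsplit]; exact List.mem_append_right _ (by simp [hy]))
          have hlead : lead lst = val :: lead suf := by
            rw [hsplit]; exact lead_split pre suf val hprelt hsufle
          have hlstlen : lst.length = pre.length + 1 + suf.length := by
            rw [hsplit]; simp; omega
          by_cases hlast : (idx : Int) + 1 ≥ (lst.length : Int)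
          · rw [if_pos hlast]
            have hsufnil : suf = [] := by
              have : suf.length = 0 := by omega
              exact List.eq_nil_of_length_eq_zero this
            rw [hlead, hsufnil]
            simp [lead]
          · rw [if_neg hlast]
            have hdrop : PySem.List.slice lst (some ((idx : Int) + 1)) none = suf := by
              rw [PySem.List.slice_from lst (show (0:Int) ≤ (idx : Int) + 1 by omega)]
              have : ((idx : Int) + 1).toNat = pre.length + 1 := by omega
              rw [this, hsplit]
              simp
            have hsufne : suf ≠ [] := by
              intro h; subst h; simp at hlstlen; omega
            have hsuflen : suf.length < n := by omega
            rw [hdrop, ih suf.length hsuflen suf rfl hsufne]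
            rw [hlead]; simp
    · rw [dif_neg h1]
      obtain ⟨x, hx⟩ : ∃ x, lst = [x] := by
        cases lst with
        | nil => exact absurd rfl hne
        | cons a t =>
          cases t with
          | nil => exact ⟨a, rfl⟩
          | cons b u => simp at h1
      subst hx
      simp [lead]

-- head and last of sorted(lst) are the min and max values
lemma sorted_head_min (lst : List Int) (c : Int) (t : List Int)
    (h : PySem.List.sorted lst (fun y => y) false = c :: t) :
    ∀ y ∈ lst, c ≤ y := by
  have := PySem.List.key_head_sorted_le lst (fun y => y) h
  simpa using this

lemma sorted_last_max (lst : List Int) (cl : Int)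
    (h : (PySem.List.sorted lst (fun y => y) false)[(PySem.List.sorted lst (fun y => y) false).length - 1]? = some cl) :
    ∀ y ∈ lst, y ≤ cl := by
  intro y hy
  obtain ⟨hlt, hcl⟩ := List.getElem?_eq_some_iff.mp h
  have hmem : y ∈ PySem.List.sorted lst (fun y => y) false := by
    rw [PySem.List.mem_sorted]; exact hy
  obtain ⟨p, hp, hyp⟩ := List.mem_iff_getElem.mp hmem
  rw [← hcl, ← hyp]
  exact PySem.List.sorted_id_getElem_mono lst (p := p)
    (q := (PySem.List.sorted lst (fun y => y) false).length - 1) (by omega) hlt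

lemma min_max_some (lst : List Int) (hne : lst ≠ []) :
    ∃ mn mx, PySem.List.min? lst (fun y => y) = some mn ∧
             PySem.List.max? lst (fun y => y) = some mx := by
  cases hmn : PySem.List.min? lst (fun y => y) with
  | none => exact absurd ((PySem.List.min?_eq_none_iff lst _).mp hmn) hne
  | some mn =>
    cases hmx : PySem.List.max? lst (fun y => y) with
    | none => exact absurd ((PySem.List.max?_eq_none_iff lst _).mp hmx) hne
    | some mx => exact ⟨mn, mx, rfl, rfl⟩

-- ===== VERDICT (by name: the statement is the Claim_ definition above) =====
theorem larger_than_right_spec : Claim_equal_larger_than_right := by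
  intro lst _hdom hne
  unfold Spec_larger_than_right
  obtain ⟨x, t, hx⟩ := List.exists_cons_of_ne_nil hne
  unfold larger_than_right
  set s := PySem.List.sorted lst (fun y => y) false with hs
  have hsne : s ≠ [] := by rw [hs, Ne, PySem.List.sorted_eq_nil_iff]; exact hne
  obtain ⟨c, st, hcons⟩ := List.exists_cons_of_ne_nil hsne
  have hslen : 1 ≤ s.length := by rw [hcons]; simp
  have hget0 : PySem.List.pyGet? s 0 = some c := by
    rw [hcons]; exact PySem.List.pyGet?_zero_cons c st
  obtain ⟨cl, hcl⟩ : ∃ cl, s[s.length - 1]? = some cl :=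
    ⟨s[s.length - 1]'(by omega), List.getElem?_eq_some_iff.mpr ⟨by omega, rfl⟩⟩
  have hgetl : PySem.List.pyGet? s ((s.length : Int) - 1) = some cl := by
    have h1 : ((s.length : Int) - 1) = ((s.length - 1 : Nat) : Int) := by omega
    rw [h1, PySem.List.pyGet?_natCast]; exact hcl
  simp only [hget0, hgetl]
  have hcmin : ∀ y ∈ lst, c ≤ y := sorted_head_min lst c st (hs ▸ hcons)
  have hlmax : ∀ y ∈ lst, y ≤ cl := sorted_last_max lst cl (hs ▸ hcl)
  have hcm : c ∈ lst := by
    have hc : c ∈ s := by rw [hcons]; simp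
    rw [hs, PySem.List.mem_sorted] at hc; exact hc
  have hlm : cl ∈ lst := by
    have hc : cl ∈ s := List.mem_of_getElem? hcl
    rw [hs, PySem.List.mem_sorted] at hc; exact hc
  obtain ⟨mn, mx, hmn, hmx⟩ := min_max_some lst hne
  have hmnmin : ∀ y ∈ lst, mn ≤ y := by
    have := PySem.List.min?_isMin hmn; simpa using this
  have hmxmax : ∀ y ∈ lst, y ≤ mx := by
    have := PySem.List.max?_isMax hmx; simpa using this
  have hmnm : mn ∈ lst := PySem.List.min?_mem hmn
  have hmxm : mx ∈ lst := PySem.List.max?_mem hmx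
  unfold larger_than_right_alt
  rw [hmn]
  dsimp only
  rw [hmx]
  dsimp only
  by_cases heq : c = cl
  · -- all elements equal: A returns [c], B returns [lst[0]]
    rw [if_pos (by simp [heq])]
    have hallc : ∀ y ∈ lst, y = c := by
      intro y hy
      have h1 := hcmin y hy; have h2 := hlmax y hy; omega
    have hmneq : mn = mx := by
      have h1 := hallc mn hmnm; have h2 := hallc mx hmxm; omega
    rw [if_pos (by simp [hmneq])]
    have hx0 : PySem.List.pyGet? lst 0 = some x := by
      rw [hx]; exact PySem.List.pyGet?_zero_cons x t
    rw [hx0]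
    have hxc : x = c := hallc x (by rw [hx]; simp)
    rw [hxc]
  · -- not all equal: A's loop = lead lst = B's scan
    rw [if_neg (by simp [heq])]
    have hmnne : mn ≠ mx := by
      intro hcontra
      apply heq
      have h1 := hmnmin c hcm
      have h2 := hmxmax cl hlm
      have h3 := hmnmin cl hlm
      have h4 := hmxmax c hcm
      omega
    rw [if_neg (by simp [hmnne])]
    rw [loopA lst.length lst rfl hne []]
    rw [List.foldl_reverse]
    rw [show lst.foldr (fun x st => altStep st x) ([], none) =
          ((lead lst).reverse, maxO lst) from foldrB lst]
    simp
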